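-- pv_equiv track=rewrite | github.com/daniel-reich/ubiquitous-fiesta | fsNMnyjMkErQtvpMW_11.py | holey_sort
-- ===== SOURCE A (Python) =====
-- def holey_sort(lst):
--
--   Values = lst
--
--   # Establishing Number of Holes in Each Item of Values
--
--   Occurrences = []
--
--   VC = 0
--   VL = len(Values)
--
--   while (VC < VL):
--
--     Text = str(Values[VC])
--     Holes = 0
--
--     Count_Zero = Text.count("0")
--     Count_Four = Text.count("4")
--     Count_Six = Text.count("6")
--     Count_Eight = Text.count("8")
--     Count_Nine = Text.count("9")
--
--     Holes += Count_Zero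
--     Holes += Count_Four
--     Holes += Count_Six
--     Holes += Count_Eight
--     Holes += Count_Eight
--     Holes += Count_Nine
--
--     Occurrences.append(Holes)
--     VC += 1
--
--   # Trimming Occurrences to Unique Values
--
--   Occurrences = set(Occurrences)
--   Occurrences = list(Occurrences)
--   Occurrences = sorted(Occurrences)
--
--   # Performing Sort
--
--   Filtered = []
--   Filtered.append("X")
--   FL = len(Filtered)
--
--   OC = 0
--   OL = len(Occurrences)
--
--   VC = 0
--   VL = len(Values)
--
--   while (FL <= VL) and (OC < OL):
--
--     Target = Occurrences[OC]
--
--     Item = Values[VC]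
--     Text = str(Values[VC])
--
--     Holes = 0
--
--     Count_Zero = Text.count("0")
--     Count_Four = Text.count("4")
--     Count_Six = Text.count("6")
--     Count_Eight = Text.count("8")
--     Count_Nine = Text.count("9")
--
--     Holes += Count_Zero
--     Holes += Count_Four
--     Holes += Count_Six
--     Holes += Count_Eight
--     Holes += Count_Eight
--     Holes += Count_Nine
--
--     if (Holes == Target):
--       Filtered.append(Item)
--       VC += 1
--     else:
--       VC += 1
--
--     if (VC == VL):
--       VC = 0
--       OC += 1
--
--   # Establishing and Giving Answer
--   Filtered = Filtered[1:]
--   return Filtered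
-- ===== SOURCE B (Python) =====
-- HOLE = {"0": 1, "4": 1, "6": 1, "8": 2, "9": 1}
--
-- def holey_sort(lst):
--     buckets = {}
--     for v in lst:
--         h = 0
--         for ch in str(v):
--             h += HOLE.get(ch, 0)
--         buckets.setdefault(h, []).append(v)
--     out = []
--     for k in sorted(buckets):
--         out.extend(buckets[k])
--     return out
-- ===== Notes on version B (the rewrite author's own statement) =====
-- stated objective: faster
-- what changed: A rescans the entire list once per distinct hole count (and recomputes each item's hole count from five str.count calls on every scan); B makes a single pass that groups items into a dict keyed by hole count (computed once per item from a char table), then concatenates the buckets over the sorted keys.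
import Mathlib
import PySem

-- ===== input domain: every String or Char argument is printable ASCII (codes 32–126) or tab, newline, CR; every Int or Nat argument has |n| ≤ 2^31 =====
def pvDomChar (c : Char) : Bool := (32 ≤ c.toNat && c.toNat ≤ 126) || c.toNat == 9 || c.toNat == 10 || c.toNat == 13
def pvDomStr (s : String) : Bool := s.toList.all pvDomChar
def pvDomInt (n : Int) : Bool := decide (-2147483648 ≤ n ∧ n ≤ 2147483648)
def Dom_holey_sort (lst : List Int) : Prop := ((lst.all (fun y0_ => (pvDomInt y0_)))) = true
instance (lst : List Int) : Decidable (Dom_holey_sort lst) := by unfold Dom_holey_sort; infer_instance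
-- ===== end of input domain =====

-- B replaces A's per-distinct-hole-count rescan of the whole list by one bucketing pass
-- over a dict count → items plus a pass over the sorted keys (objective: faster, constant factor).

-- ===== PORT A =====
-- hole count of one item, exactly as A computes it (str + five .count calls, 8 added twice)
def holesA (v : Int) : Int :=
  let Text := PySem.Int.toStr v
  let Holes : Int := 0
  let Count_Zero := PySem.Str.count Text "0"
  let Count_Four := PySem.Str.count Text "4"
  let Count_Six := PySem.Str.count Text "6"
  let Count_Eight := PySem.Str.count Text "8"
  let Count_Nine := PySem.Str.count Text "9"
  let Holes := Holes + (Count_Zero : Int)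
  let Holes := Holes + (Count_Four : Int)
  let Holes := Holes + (Count_Six : Int)
  let Holes := Holes + (Count_Eight : Int)
  let Holes := Holes + (Count_Eight : Int)
  let Holes := Holes + (Count_Nine : Int)
  Holes

def holey_sort (lst : List Int) : List Int :=
  let Values := lst
  -- first while loop: append each item's hole count
  let Occurrences : List Int := Values.foldl (fun acc v => acc ++ [holesA v]) []
  let Occurrences := PySem.Set.ofList Occurrences
  let Occurrences := PySem.List.sorted Occurrences (fun x => x) false
  -- Python seeds Filtered with the sentinel "X" (stripped by Filtered[1:] at the end);
  -- here Filtered starts empty and FL below is the sentinel list's length 1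
  let Filtered : List Int := []
  -- second while loop: FL(=1) ≤ VL and OC < OL; VC resets to 0 when it reaches VL,
  -- i.e. one full scan of Values per element of Occurrences
  if 1 ≤ Values.length then
    Occurrences.foldl (fun acc t =>
      Values.foldl (fun acc2 v => if holesA v == t then acc2 ++ [v] else acc2) acc) Filtered
  else Filtered

-- ===== PORT B =====
def HOLE : PySem.Dict Char Int :=
  PySem.Dict.ofList [('0', 1), ('4', 1), ('6', 1), ('8', 2), ('9', 1)]

-- hole count of one item, as Source B computes it: sum of HOLE.get(ch, 0) over str(v)
def holesB (v : Int) : Int :=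
  (PySem.Int.toChars v).foldl (fun h c => h + HOLE.getD c 0) 0

def holey_sort_alt (lst : List Int) : List Int :=
  -- buckets.setdefault(h, []).append(v)
  let buckets : PySem.Dict Int (List Int) :=
    lst.foldl (fun d v => d.modify (holesB v) [] (fun b => b ++ [v])) PySem.Dict.empty
  -- for k in sorted(buckets): out.extend(buckets[k])
  (PySem.List.sorted buckets.keys (fun x => x) false).foldl
    (fun acc k => acc ++ buckets.getD k []) []

-- ===== PRECONDITION & SPEC =====
def Spec_holey_sort (lst : List Int) (out : List Int) : Prop := out = holey_sort_alt lst
instance (lst : List Int) (out : List Int) : Decidable (Spec_holey_sort lst out) := by unfold Spec_holey_sort; infer_instance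

-- ===== CLAIM (what is proved, stated in full; the proofs are below) =====
def Claim_equal_holey_sort : Prop := ∀ (lst : List Int), Dom_holey_sort lst → Spec_holey_sort lst (holey_sort lst)

-- ===== LEMMAS AND PROOFS =====

-- PySem.Chars.count with a single-character needle is List.count
theorem chars_count_go_singleton (d : Char) (cs : List Char) : ∀ (fuel acc : Nat), cs.length ≤ fuel →
    PySem.Chars.count.go [d] fuel cs acc = acc + cs.count d := by
  induction cs with
  | nil => intro fuel acc _; cases fuel <;> simp [PySem.Chars.count.go]
  | cons c t ih =>
    intro fuel acc h
    cases fuel with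
    | zero => simp at h
    | succ f =>
      rw [PySem.Chars.count.go.eq_def]
      simp only [List.isPrefixOf, List.length_cons] at *
      by_cases hc : c = d
      · subst hc
        simp [ih f (acc + 1) (by omega)]
        omega
      · simp [hc, ih f acc (by omega), Ne.symm hc]

theorem chars_count_singleton (cs : List Char) (d : Char) :
    PySem.Chars.count cs [d] = cs.count d := by
  simp [PySem.Chars.count, chars_count_go_singleton d cs cs.length 0 le_rfl]

-- the HOLE lookup as an explicit case split
theorem hole_getD (c : Char) :
    HOLE.getD c 0 = if c = '0' then 1 else if c = '4' then 1 else if c = '6' then 1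
      else if c = '8' then 2 else if c = '9' then 1 else 0 := by
  have hH : HOLE = PySem.Dict.mk [('0', 1), ('4', 1), ('6', 1), ('8', 2), ('9', 1)] := by decide
  rw [hH]
  simp only [PySem.Dict.getD_eq_get?_getD, PySem.Dict.get?_mk_cons, beq_iff_eq]
  split_ifs <;> simp_all [PySem.Dict.get?, eq_comm]

-- the per-character hole values summed over a string
theorem holes_sum (cs : List Char) :
    (cs.map (fun c => HOLE.getD c 0)).sum
      = (cs.count '0' : Int) + cs.count '4' + cs.count '6' + 2 * cs.count '8' + cs.count '9' := by
  induction cs with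
  | nil => simp
  | cons c t ih =>
    simp only [List.map_cons, List.sum_cons, List.count_cons]
    rw [hole_getD, ih]
    by_cases h0 : c = '0'
    · subst h0; simp; omega
    by_cases h4 : c = '4'
    · subst h4; simp; omega
    by_cases h6 : c = '6'
    · subst h6; simp; omega
    by_cases h8 : c = '8'
    · subst h8; simp; omega
    by_cases h9 : c = '9'
    · subst h9; simp; omega
    simp [h0, h4, h6, h8, h9]

-- both per-item hole counts agree
theorem holes_eq (v : Int) : holesB v = holesA v := by
  unfold holesA holesB
  dsimp only
  rw [PySem.List.foldl_add (g := fun c => HOLE.getD c 0), holes_sum]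
  have e0 : "0".toList = ['0'] := rfl
  have e4 : "4".toList = ['4'] := rfl
  have e6 : "6".toList = ['6'] := rfl
  have e8 : "8".toList = ['8'] := rfl
  have e9 : "9".toList = ['9'] := rfl
  simp only [PySem.Str.count_eq, PySem.Int.toList_toStr, e0, e4, e6, e8, e9,
    chars_count_singleton]
  ring

-- A's result is a flatMap of filters over the sorted distinct hole counts
theorem holey_sort_eq_flatMap (lst : List Int) :
    holey_sort lst =
      (PySem.List.sorted (PySem.Set.ofList (lst.map holesA)) (fun x => x) false).flatMap
        (fun t => lst.filter (fun v => holesA v == t)) := by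
  unfold holey_sort
  dsimp only
  rw [PySem.List.foldl_append_singleton_eq_map]
  simp only [List.nil_append]
  cases lst with
  | nil => simp
  | cons x xs =>
    simp only [List.length_cons, if_pos (by omega : 1 ≤ xs.length + 1)]
    rw [PySem.List.foldl_congr_mem _ _
        (fun acc t => acc ++ (x :: xs).filter (fun v => holesA v == t)) []
        (fun acc t _ => PySem.List.foldl_append_if_eq_filter (fun v => holesA v == t) (x :: xs) acc),
      PySem.List.foldl_append_eq_flatMap]
    simp

-- B's buckets looked up at k hold exactly the items with hole count k, in order
theorem buckets_getD (lst : List Int) (k : Int) :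
    (lst.foldl (fun d v => d.modify (holesB v) [] (fun b => b ++ [v])) PySem.Dict.empty).getD k []
      = lst.filter (fun v => holesB v == k) := by
  have h : lst.foldl (fun d v => d.modify (holesB v) [] (fun b => b ++ [v])) PySem.Dict.empty
      = (lst.map (fun v => (holesB v, v))).foldl
          (fun d p => d.modify p.1 [] (fun b => b ++ [p.2])) PySem.Dict.empty := by
    rw [List.foldl_map]
  rw [h, PySem.Dict.getD_foldl_modify_append]
  simp [List.filter_map, Function.comp_def]

-- B's bucket keys are the distinct hole counts in first-occurrence order
theorem buckets_keys (lst : List Int) :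
    (lst.foldl (fun d v => d.modify (holesB v) [] (fun b => b ++ [v])) PySem.Dict.empty).keys
      = PySem.Set.ofList (lst.map holesB) := by
  rw [PySem.Dict.keys_foldl_modify_key (key := holesB) (f := fun _ v => fun b => b ++ [v])]
  simp [PySem.Set.ofList_eq_foldl, PySem.Set.update, PySem.Dict.keys_empty]

theorem holey_sort_alt_eq_flatMap (lst : List Int) :
    holey_sort_alt lst =
      (PySem.List.sorted (PySem.Set.ofList (lst.map holesB)) (fun x => x) false).flatMap
        (fun t => lst.filter (fun v => holesB v == t)) := by
  unfold holey_sort_alt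
  dsimp only
  rw [PySem.List.foldl_congr_mem _ _
      (fun acc k => acc ++ lst.filter (fun v => holesB v == k)) []
      (fun acc k _ => by rw [buckets_getD]),
    PySem.List.foldl_append_eq_flatMap, buckets_keys]
  simp

-- ===== VERDICT (by name: the statement is the Claim_ definition above) =====
theorem holey_sort_spec : Claim_equal_holey_sort := by
  intro lst _
  unfold Spec_holey_sort
  rw [holey_sort_eq_flatMap, holey_sort_alt_eq_flatMap]
  simp only [funext_iff.mpr holes_eq]
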